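-- pv_equiv track=rewrite | github.com/dmitry-ulyanichev/godmodetoday | breedrust/services/compute.py | remove_bad_genes
-- ===== SOURCE A (Python) =====
-- def remove_bad_genes(data):
--     """
--     This function removes genes without any good letters (Y,G,H) and
--     if X, *, and W occupy the same loci in otherwise identical genes,
--     it prioritizes those with Xs over stars and Ws.
--     """
--     good_letters = {'Y', 'G', 'H'}
--     weights = {'X': 2, '*': 1, 'W': 0}
--
--     def has_good_letter(gene):
--         return any(letter in good_letters for letter in gene)
--
--     def get_pattern_and_weight(gene):
--         pattern = ''.join(letter if letter in good_letters else '.' for letter in gene)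
--         total_weight = sum(weights.get(letter, 0) for letter in gene)
--         return pattern, total_weight
--
--     # Step 1: Filter out genes that have no good letters
--     filtered_genes = {key: gene for key, gene in data.items() if has_good_letter(gene)}
--
--     # Step 2: Group genes by their patterns and compare them
--     grouped_genes = {}
--     for key, gene in filtered_genes.items():
--         pattern, total_weight = get_pattern_and_weight(gene)
--         if pattern not in grouped_genes:
--             grouped_genes[pattern] = []
--         grouped_genes[pattern].append((key, gene, total_weight))
--
--     # Step 3: Retain the gene with the highest total weight within each group
--     result = {}
--     for genes in grouped_genes.values():
--         # Sort by total weight (descending)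
--         genes.sort(key=lambda x: -x[2])
--         best_gene = genes[0]
--         result[best_gene[0]] = best_gene[1]
--
--     return result
--
-- weights = {"Y": 2.0, "G": 1.75, "H": 1.2, "X": 0.3, "W": 0, "*": 0.2}
-- ===== SOURCE B (Python) =====
-- def remove_bad_genes(data):
--     """Single streaming pass: skip genes without good letters and keep, per
--     pattern, the first gene of strictly greatest X/*/W weight."""
--     good = ('Y', 'G', 'H')
--     letter_weight = {'X': 2, '*': 1, 'W': 0}
--     best = {}  # pattern -> (key, gene, weight)
--     for key, gene in data.items():
--         if not any(l in good for l in gene):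
--             continue
--         pattern = ''.join(l if l in good else '.' for l in gene)
--         tw = sum(letter_weight.get(l, 0) for l in gene)
--         cur = best.get(pattern)
--         if cur is None or tw > cur[2]:
--             best[pattern] = (key, gene, tw)
--     return {v[0]: v[1] for v in best.values()}
-- ===== Notes on version B (the rewrite author's own statement) =====
-- stated objective: simpler
-- what changed: A's three passes (filter dict, group genes into per-pattern lists, then sort each group by descending weight to pick its head) are fused into one streaming fold that keeps, per pattern, only the first gene of strictly greatest weight, so no intermediate candidate lists and no sort are built.
import Mathlib
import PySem

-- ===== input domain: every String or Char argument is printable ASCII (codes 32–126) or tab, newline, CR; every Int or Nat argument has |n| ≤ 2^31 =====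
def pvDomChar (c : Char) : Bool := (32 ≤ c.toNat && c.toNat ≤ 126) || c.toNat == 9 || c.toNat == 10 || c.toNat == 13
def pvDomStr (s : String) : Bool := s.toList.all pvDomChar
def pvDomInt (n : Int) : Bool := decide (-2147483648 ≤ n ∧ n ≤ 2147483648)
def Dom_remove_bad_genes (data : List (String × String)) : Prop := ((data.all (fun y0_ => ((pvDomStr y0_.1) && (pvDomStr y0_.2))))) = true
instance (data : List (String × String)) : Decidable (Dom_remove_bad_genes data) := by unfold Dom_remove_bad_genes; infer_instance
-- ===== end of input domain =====

-- B fuses A's three passes (filter, group-by-pattern, sort-each-group-and-pick) into one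
-- streaming fold keeping the current first strict-maximum per pattern; objective: simpler.

-- ===== PORT A =====
-- letter in good_letters, for good_letters = {'Y', 'G', 'H'}
def pvGood (c : Char) : Bool := c = 'Y' || c = 'G' || c = 'H'

-- weights = {'X': 2, '*': 1, 'W': 0}
def pvWeights : PySem.Dict Char Int := PySem.Dict.mk [('X', 2), ('*', 1), ('W', 0)]

def pvHasGoodLetter (gene : String) : Bool := gene.toList.any pvGood

def pvPatternA (gene : String) : String :=
  String.mk (gene.toList.map (fun c => if pvGood c then c else '.'))

def pvTotalWeightA (gene : String) : Int :=
  (gene.toList.map (fun c => pvWeights.getD c 0)).sum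

def remove_bad_genes (data : List (String × String)) : List (String × String) :=
  -- Step 1: filter out genes that have no good letters
  let filtered := data.filter (fun kv => pvHasGoodLetter kv.2)
  -- Step 2: group genes by their patterns
  let grouped := filtered.foldl
    (fun (d : PySem.Dict String (List (String × String × Int))) kv =>
      let p := pvPatternA kv.2
      let w := pvTotalWeightA kv.2
      let d := if d.contains p then d else d.insert p []    -- if pattern not in grouped: grouped[pattern] = []
      d.insert p (d.getD p [] ++ [(kv.1, kv.2, w)]))        -- grouped[pattern].append((key, gene, total_weight))
    PySem.Dict.empty
  -- Step 3: retain the gene with the highest total weight within each group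
  let result := grouped.values.foldl
    (fun (r : PySem.Dict String String) genes =>
      match PySem.List.sorted genes (fun x => -x.2.2) with  -- genes.sort(key=lambda x: -x[2])
      | [] => r                                             -- unreachable: every group is nonempty
      | best :: _ => r.insert best.1 best.2.1)              -- result[best_gene[0]] = best_gene[1]
    PySem.Dict.empty
  result.items

-- ===== PORT B =====
-- l in good, for good = ('Y', 'G', 'H')
def pvInGoodB (c : Char) : Bool := ['Y', 'G', 'H'].contains c

-- letter_weight = {'X': 2, '*': 1, 'W': 0}
def pvLetterWeightB : PySem.Dict Char Int := PySem.Dict.mk [('X', 2), ('*', 1), ('W', 0)]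

def remove_bad_genes_alt (data : List (String × String)) : List (String × String) :=
  let best := data.foldl
    (fun (b : PySem.Dict String (String × String × Int)) kv =>
      if ¬ (kv.2.toList.any pvInGoodB) then b               -- continue
      else
        let pattern := String.mk (kv.2.toList.map (fun l => if pvInGoodB l then l else '.'))
        let tw := (kv.2.toList.map (fun l => pvLetterWeightB.getD l 0)).sum
        match b.get? pattern with                            -- cur = best.get(pattern)
        | none => b.insert pattern (kv.1, kv.2, tw)
        | some cur => if tw > cur.2.2 then b.insert pattern (kv.1, kv.2, tw) else b)
    PySem.Dict.empty
  (best.values.foldl (fun (r : PySem.Dict String String) v => r.insert v.1 v.2.1)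
    PySem.Dict.empty).items

-- ===== PRECONDITION & SPEC =====
def Spec_remove_bad_genes (data : List (String × String)) (out : List (String × String)) : Prop := out = remove_bad_genes_alt data
instance (data : List (String × String)) (out : List (String × String)) : Decidable (Spec_remove_bad_genes data out) := by unfold Spec_remove_bad_genes; infer_instance

-- ===== CLAIM (what is proved, stated in full; the proofs are below) =====
def Claim_equal_remove_bad_genes : Prop := ∀ (data : List (String × String)), Dom_remove_bad_genes data → Spec_remove_bad_genes data (remove_bad_genes data)

-- ===== LEMMAS AND PROOFS =====

-- B's running "first strict maximum" selection, as a function of a whole group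
def pvSelStep (b x : String × String × Int) : String × String × Int :=
  if x.2.2 > b.2.2 then x else b

def pvSel : List (String × String × Int) → (String × String × Int)
  | [] => ("", "", 0)
  | a :: t => t.foldl pvSelStep a

theorem pvGood_eq_inGood (c : Char) : pvGood c = pvInGoodB c := by
  simp only [pvGood, pvInGoodB, List.contains_cons, List.contains_nil, Bool.or_false]
  simp [beq_eq_decide, Bool.or_assoc]

-- head of the (stable) insertion sort by descending weight = B's first strict maximum
theorem pv_insertBy_foldl_head (l : List (String × String × Int))
    (a : String × String × Int) (t : List (String × String × Int)) :
    ∃ t', l.foldl (fun acc x =>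
        PySem.List.insertBy (fun u v => decide ((-u.2.2) < (-v.2.2))) x acc) (a :: t)
      = (l.foldl pvSelStep a) :: t' := by
  induction l generalizing a t with
  | nil => exact ⟨t, rfl⟩
  | cons x l ih =>
    rw [List.foldl_cons, List.foldl_cons]
    by_cases h : a.2.2 < x.2.2
    · have hins : PySem.List.insertBy (fun u v => decide ((-u.2.2) < (-v.2.2))) x (a :: t)
          = x :: a :: t := by
        simp [PySem.List.insertBy]; omega
      have hsel : pvSelStep a x = x := by simp [pvSelStep, h]
      rw [hins, hsel]
      exact ih x (a :: t)
    · have hins : PySem.List.insertBy (fun u v => decide ((-u.2.2) < (-v.2.2))) x (a :: t)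
          = a :: PySem.List.insertBy (fun u v => decide ((-u.2.2) < (-v.2.2))) x t := by
        simp [PySem.List.insertBy]; omega
      have hsel : pvSelStep a x = a := by
        simp only [pvSelStep]; rw [if_neg]; omega
      rw [hins, hsel]
      exact ih a _

theorem pv_sorted_head (genes : List (String × String × Int)) (hne : genes ≠ []) :
    ∃ t', PySem.List.sorted genes (fun x => -x.2.2) = pvSel genes :: t' := by
  match genes, hne with
  | a :: t, _ =>
    simp only [PySem.List.sorted, PySem.List.insertBy, List.foldl_cons]
    exact pv_insertBy_foldl_head t a []


-- ----- named step functions (rfl-equal to the lambdas inside the ports) -----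

def pvAStep (d : PySem.Dict String (List (String × String × Int))) (kv : String × String) :
    PySem.Dict String (List (String × String × Int)) :=
  let p := pvPatternA kv.2
  let w := pvTotalWeightA kv.2
  let d := if d.contains p then d else d.insert p []
  d.insert p (d.getD p [] ++ [(kv.1, kv.2, w)])

def pvBStep (b : PySem.Dict String (String × String × Int)) (kv : String × String) :
    PySem.Dict String (String × String × Int) :=
  match b.get? (pvPatternA kv.2) with
  | none => b.insert (pvPatternA kv.2) (kv.1, kv.2, pvTotalWeightA kv.2)
  | some cur =>
    if pvTotalWeightA kv.2 > cur.2.2 then b.insert (pvPatternA kv.2) (kv.1, kv.2, pvTotalWeightA kv.2)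
    else b

theorem pvPattern_eq (g : String) :
    String.mk (g.toList.map (fun l => if pvInGoodB l then l else '.')) = pvPatternA g := by
  have : (fun l => if pvInGoodB l then l else '.') = (fun c => if pvGood c then c else '.') := by
    funext c; rw [pvGood_eq_inGood]
  rw [pvPatternA, this]

theorem pvHasGood_eq (g : String) : g.toList.any pvInGoodB = pvHasGoodLetter g := by
  have : pvInGoodB = pvGood := by funext c; rw [pvGood_eq_inGood]
  rw [pvHasGoodLetter, this]

theorem pv_mem_contains (d : PySem.Dict String (List (String × String × Int)))
    {p : String} (h : p ∈ d.items.map Prod.fst) : d.contains p = true := by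
  rcases List.mem_map.mp h with ⟨pr, hpr, hfst⟩
  unfold PySem.Dict.contains
  exact List.any_eq_true.mpr ⟨pr, hpr, by simp [hfst]⟩

-- A's two-step append to grouped[pattern] is a single overwrite-insert
theorem pv_aStep_eq (d : PySem.Dict String (List (String × String × Int))) (kv : String × String) :
    pvAStep d kv = d.insert (pvPatternA kv.2)
      (d.getD (pvPatternA kv.2) [] ++ [(kv.1, kv.2, pvTotalWeightA kv.2)]) := by
  unfold pvAStep
  by_cases hc : d.contains (pvPatternA kv.2)
  · simp [hc]
  · simp only [hc, Bool.false_eq_true, if_false]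
    rw [PySem.Dict.getD_insert_self, PySem.Dict.insert_insert_self,
      PySem.Dict.getD_of_not_contains d [] (by simpa using hc)]

-- the invariant tying A's groups to B's running best
def pvInv (dA : PySem.Dict String (List (String × String × Int)))
    (dB : PySem.Dict String (String × String × Int)) : Prop :=
  dB.items = dA.items.map (fun pr => (pr.1, pvSel pr.2)) ∧
  (∀ pr ∈ dA.items, pr.2 ≠ []) ∧ (dA.items.map Prod.fst).Nodup

theorem pv_inv_get {dA : PySem.Dict String (List (String × String × Int))}
    {dB : PySem.Dict String (String × String × Int)} (h : pvInv dA dB) (p : String) :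
    dB.get? p = (dA.get? p).map pvSel := by
  rw [PySem.Dict.get?, PySem.Dict.get?, h.1, List.find?_map]
  have hfun : ((fun q : String × (String × String × Int) => q.1 == p) ∘
      fun pr : String × List (String × String × Int) => (pr.1, pvSel pr.2)) =
      fun pr : String × List (String × String × Int) => pr.1 == p := rfl
  rw [hfun]
  cases dA.items.find? (fun pr => pr.1 == p) <;> rfl

theorem pv_key_unique {α : Type} {l : List (String × α)} (h : (l.map Prod.fst).Nodup)
    {p : String} {v w : α} (hv : (p, v) ∈ l) (hw : (p, w) ∈ l) : v = w := by
  induction l with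
  | nil => cases hv
  | cons q l ih =>
    have hh : q.1 ∉ l.map Prod.fst ∧ (l.map Prod.fst).Nodup := by
      simpa [List.nodup_cons] using h
    rcases List.mem_cons.mp hv with h1 | h1
    · rcases List.mem_cons.mp hw with h2 | h2
      · simpa using congrArg Prod.snd (h1.trans h2.symm)
      · have hp_eq : p = q.1 := congrArg Prod.fst h1
        exact absurd (List.mem_map.mpr ⟨(p, w), h2, rfl⟩) (hp_eq ▸ hh.1)
    · rcases List.mem_cons.mp hw with h2 | h2
      · have hp_eq : p = q.1 := congrArg Prod.fst h2
        exact absurd (List.mem_map.mpr ⟨(p, v), h1, rfl⟩) (hp_eq ▸ hh.1)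
      · exact ih hh.2 h1 h2

theorem pvSel_append (lst : List (String × String × Int)) (x : String × String × Int)
    (h : lst ≠ []) : pvSel (lst ++ [x]) = pvSelStep (pvSel lst) x := by
  match lst, h with
  | a :: t, _ => simp [pvSel, List.foldl_append]

theorem pv_step_inv {dA : PySem.Dict String (List (String × String × Int))}
    {dB : PySem.Dict String (String × String × Int)} (h : pvInv dA dB) (kv : String × String) :
    pvInv (pvAStep dA kv) (pvBStep dB kv) := by
  obtain ⟨hmap, hne, hnd⟩ := h
  have hBg : dB.get? (pvPatternA kv.2) = (dA.get? (pvPatternA kv.2)).map pvSel :=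
    pv_inv_get ⟨hmap, hne, hnd⟩ (pvPatternA kv.2)
  rw [pv_aStep_eq]
  cases hA : dA.get? (pvPatternA kv.2) with
  | none =>
    have hcA : dA.contains (pvPatternA kv.2) = false := by
      rw [PySem.Dict.contains_eq_isSome_get?, hA]; rfl
    have hgB : dB.get? (pvPatternA kv.2) = none := by rw [hBg, hA]; rfl
    have hcB : dB.contains (pvPatternA kv.2) = false := by
      rw [PySem.Dict.contains_eq_isSome_get?, hgB]; rfl
    have hstepB : pvBStep dB kv
        = dB.insert (pvPatternA kv.2) (kv.1, kv.2, pvTotalWeightA kv.2) := by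
      unfold pvBStep; rw [hgB]
    have hpnot : pvPatternA kv.2 ∉ dA.items.map Prod.fst := by
      intro hmem'
      rw [pv_mem_contains dA hmem'] at hcA; cases hcA
    rw [hstepB, PySem.Dict.getD_of_not_contains dA [] hcA]
    refine ⟨?_, ?_, ?_⟩
    · rw [PySem.Dict.items_insert_of_not_contains dB _ hcB,
        PySem.Dict.items_insert_of_not_contains dA _ hcA, List.map_append, hmap]
      rfl
    · intro pr hpr
      rw [PySem.Dict.items_insert_of_not_contains dA _ hcA] at hpr
      rcases List.mem_append.mp hpr with h1 | h1
      · exact hne pr h1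
      · simp only [List.mem_singleton] at h1; subst h1; simp
    · rw [PySem.Dict.items_insert_of_not_contains dA _ hcA, List.map_append]
      apply List.Nodup.append hnd (by simp)
      intro a ha hb
      simp only [List.map_cons, List.map_nil, List.mem_singleton] at hb
      subst hb
      exact hpnot ha
  | some lst =>
    have hcA : dA.contains (pvPatternA kv.2) = true := by
      rw [PySem.Dict.contains_eq_isSome_get?, hA]; rfl
    have hmem : (pvPatternA kv.2, lst) ∈ dA.items := PySem.Dict.mem_items_of_get?_eq_some dA hA
    have hlst : lst ≠ [] := hne _ hmem
    have hgB : dB.get? (pvPatternA kv.2) = some (pvSel lst) := by rw [hBg, hA]; rfl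
    have hcB : dB.contains (pvPatternA kv.2) = true := by
      rw [PySem.Dict.contains_eq_isSome_get?, hgB]; rfl
    have hselapp := pvSel_append lst (kv.1, kv.2, pvTotalWeightA kv.2) hlst
    have hstepB : pvBStep dB kv =
        if pvTotalWeightA kv.2 > (pvSel lst).2.2
        then dB.insert (pvPatternA kv.2) (kv.1, kv.2, pvTotalWeightA kv.2) else dB := by
      unfold pvBStep; rw [hgB]
    have hitemsA : (dA.insert (pvPatternA kv.2) (lst ++ [(kv.1, kv.2, pvTotalWeightA kv.2)])).items =
        dA.items.map (fun q => if q.1 == pvPatternA kv.2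
          then (pvPatternA kv.2, lst ++ [(kv.1, kv.2, pvTotalWeightA kv.2)]) else q) :=
      PySem.Dict.items_insert_of_contains dA _ hcA
    have hval : ∀ q ∈ dA.items, q.1 = pvPatternA kv.2 → q.2 = lst := by
      intro q hq hq1
      exact pv_key_unique hnd (show (pvPatternA kv.2, q.2) ∈ dA.items by rw [← hq1]; exact hq) hmem
    have hfst : ((dA.insert (pvPatternA kv.2) (lst ++ [(kv.1, kv.2, pvTotalWeightA kv.2)])).items.map
        Prod.fst) = dA.items.map Prod.fst := by
      rw [hitemsA, List.map_map]
      refine List.map_congr_left ?_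
      intro q hq
      by_cases h1 : q.1 = pvPatternA kv.2 <;> simp [Function.comp, h1]
    have hne' : ∀ pr ∈ (dA.insert (pvPatternA kv.2)
        (lst ++ [(kv.1, kv.2, pvTotalWeightA kv.2)])).items, pr.2 ≠ [] := by
      intro pr hpr
      rw [hitemsA] at hpr
      rcases List.mem_map.mp hpr with ⟨q, hq, hqe⟩
      by_cases h1 : q.1 = pvPatternA kv.2
      · rw [← hqe]; simp [h1]
      · rw [← hqe]; simp only [h1, beq_iff_eq, if_false]; exact hne q hq
    rw [PySem.Dict.getD_of_get?_eq_some dA [] hA, hstepB]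
    by_cases hw : pvTotalWeightA kv.2 > (pvSel lst).2.2
    · rw [if_pos hw]
      refine ⟨?_, hne', hfst ▸ hnd⟩
      rw [PySem.Dict.items_insert_of_contains dB _ hcB, hmap, hitemsA,
        List.map_map, List.map_map]
      refine List.map_congr_left ?_
      intro q hq
      by_cases h1 : q.1 = pvPatternA kv.2
      · have hq2 : q.2 = lst := hval q hq h1
        simp only [Function.comp, h1, beq_self_eq_true, if_true]
        rw [hselapp]
        simp [pvSelStep, hw]
      · simp [Function.comp, h1]
    · rw [if_neg hw]
      refine ⟨?_, hne', hfst ▸ hnd⟩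
      rw [hmap, hitemsA, List.map_map]
      refine List.map_congr_left ?_
      intro q hq
      by_cases h1 : q.1 = pvPatternA kv.2
      · have hq2 : q.2 = lst := hval q hq h1
        simp only [Function.comp, h1, beq_self_eq_true, if_true]
        rw [hselapp, hq2]
        simp [pvSelStep, hw]
      · simp [Function.comp, h1]

theorem pv_foldl_inv (l : List (String × String))
    {dA : PySem.Dict String (List (String × String × Int))}
    {dB : PySem.Dict String (String × String × Int)} (h : pvInv dA dB) :
    pvInv (l.foldl pvAStep dA) (l.foldl pvBStep dB) := by
  induction l generalizing dA dB with
  | nil => exact h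
  | cons kv l ih => exact ih (pv_step_inv h kv)

-- ----- stitching the two ports together -----

def pvBLam (b : PySem.Dict String (String × String × Int)) (kv : String × String) :
    PySem.Dict String (String × String × Int) :=
  if ¬ (kv.2.toList.any pvInGoodB) then b
  else
    let pattern := String.mk (kv.2.toList.map (fun l => if pvInGoodB l then l else '.'))
    let tw := (kv.2.toList.map (fun l => pvLetterWeightB.getD l 0)).sum
    match b.get? pattern with
    | none => b.insert pattern (kv.1, kv.2, tw)
    | some cur => if tw > cur.2.2 then b.insert pattern (kv.1, kv.2, tw) else b

theorem pv_A_unfold (data : List (String × String)) : remove_bad_genes data =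
    (((data.filter (fun kv => pvHasGoodLetter kv.2)).foldl pvAStep PySem.Dict.empty).values.foldl
      (fun (r : PySem.Dict String String) genes =>
        match PySem.List.sorted genes (fun x => -x.2.2) with
        | [] => r
        | best :: _ => r.insert best.1 best.2.1) PySem.Dict.empty).items := rfl

theorem pv_B_unfold (data : List (String × String)) : remove_bad_genes_alt data =
    ((data.foldl pvBLam PySem.Dict.empty).values.foldl
      (fun (r : PySem.Dict String String) v => r.insert v.1 v.2.1) PySem.Dict.empty).items := rfl

theorem pv_alt_fold (data : List (String × String)) :
    data.foldl pvBLam PySem.Dict.empty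
      = (data.filter (fun kv => pvHasGoodLetter kv.2)).foldl pvBStep PySem.Dict.empty := by
  rw [List.foldl_filter]
  apply PySem.List.foldl_congr_mem
  intro b kv _
  by_cases hg : pvHasGoodLetter kv.2
  · rw [if_pos hg]
    have hany : (kv.2.toList.any pvInGoodB) = true := by rw [pvHasGood_eq]; exact hg
    unfold pvBLam
    rw [if_neg (by simp [hany])]
    simp only [pvPattern_eq]
    rfl
  · rw [if_neg hg]
    have hany : (kv.2.toList.any pvInGoodB) = false := by
      rw [pvHasGood_eq]; exact Bool.eq_false_iff.mpr hg
    unfold pvBLam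
    rw [if_pos (by simp [hany])]

theorem pv_result_eq {dA : PySem.Dict String (List (String × String × Int))}
    {dB : PySem.Dict String (String × String × Int)} (h : pvInv dA dB) :
    dA.values.foldl
      (fun (r : PySem.Dict String String) genes =>
        match PySem.List.sorted genes (fun x => -x.2.2) with
        | [] => r
        | best :: _ => r.insert best.1 best.2.1) PySem.Dict.empty
    = dB.values.foldl (fun (r : PySem.Dict String String) v => r.insert v.1 v.2.1)
        PySem.Dict.empty := by
  have hv : dB.values = dA.values.map pvSel := by
    rw [PySem.Dict.values, PySem.Dict.values, h.1, List.map_map, List.map_map]; rfl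
  rw [hv, List.foldl_map]
  apply PySem.List.foldl_congr_mem
  intro r genes hg
  have hne : genes ≠ [] := by
    rw [PySem.Dict.values] at hg
    rcases List.mem_map.mp hg with ⟨pr, hpr, hpe⟩
    rw [← hpe]
    exact h.2.1 pr hpr
  obtain ⟨t', ht'⟩ := pv_sorted_head genes hne
  rw [ht']

theorem pv_main (data : List (String × String)) :
    remove_bad_genes data = remove_bad_genes_alt data := by
  have hempty : pvInv (PySem.Dict.empty : PySem.Dict String (List (String × String × Int)))
      (PySem.Dict.empty : PySem.Dict String (String × String × Int)) := by
    refine ⟨rfl, ?_, ?_⟩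
    · intro pr hpr
      exact absurd hpr (by simp [PySem.Dict.empty])
    · simp [PySem.Dict.empty]
  have hinv := pv_foldl_inv (data.filter (fun kv => pvHasGoodLetter kv.2)) hempty
  rw [pv_A_unfold, pv_B_unfold, pv_alt_fold, pv_result_eq hinv]

-- ===== VERDICT (by name: the statement is the Claim_ definition above) =====
theorem remove_bad_genes_spec : Claim_equal_remove_bad_genes := by
  intro data _
  unfold Spec_remove_bad_genes
  exact pv_main data
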